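-- pv_equiv track=rewrite | github.com/Sufi78614/sycs | TOC/Prac7.py | turing_string
-- ===== SOURCE A (Python) =====
-- def turing_string(s):
--     state = 0
--     count_a = count_b = count_c = 0
--
--     for char in s:
--         if state == 0:
--             if char == 'a':
--                 state = 1
--                 count_a += 1
--             else:
--                 return False
--
--         elif state == 1:
--             if char == 'a':
--                 count_a += 1
--             elif char == 'b':
--                 state = 2
--                 count_b += 1
--             else:
--                 return False
--
--         elif state == 2:
--             if char == 'b':
--                 count_b += 1
--             elif char == 'c':
--                 state = 3
--                 count_c += 1
--             else:
--                 return False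
--
--         elif state == 3:
--             if char == 'c':
--                 count_c += 1
--             else:
--                 return False
--
--     if count_a == count_b == count_c and state == 3:
--         return True
--     else:
--         return False
-- ===== SOURCE B (Python) =====
-- def turing_string(s):
--     n = len(s) // 3
--     return n >= 1 and s == 'a' * n + 'b' * n + 'c' * n
-- ===== Notes on version B (the rewrite author's own statement) =====
-- stated objective: simpler
-- what changed: Replaced the per-character 4-state FSM scan by a closed-form check: compute n = len(s)//3, build the unique candidate string 'a'*n+'b'*n+'c'*n and compare it to s (no loop, no state, no counters).
import Mathlib
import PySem

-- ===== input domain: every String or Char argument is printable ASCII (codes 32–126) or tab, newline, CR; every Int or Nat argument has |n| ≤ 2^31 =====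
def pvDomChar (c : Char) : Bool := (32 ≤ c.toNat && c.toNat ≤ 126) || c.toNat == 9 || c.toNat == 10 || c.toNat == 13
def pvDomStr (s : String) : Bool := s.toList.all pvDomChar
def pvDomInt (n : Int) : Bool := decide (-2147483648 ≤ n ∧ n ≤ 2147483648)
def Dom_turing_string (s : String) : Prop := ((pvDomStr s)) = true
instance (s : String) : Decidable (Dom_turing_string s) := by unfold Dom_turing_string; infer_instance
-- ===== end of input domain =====

-- B replaces A's per-character 4-state FSM scan by a closed form: n = len(s)//3 and
-- comparison of s with the unique candidate 'a'*n+'b'*n+'c'*n; objective: simpler.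

-- ===== PORT A =====
-- A's for-loop over the characters, carrying state and the three counters; early `return False` = `false`.
def turingLoopA : List Char → Nat → Nat → Nat → Nat → Bool
  | [], state, ca, cb, cc =>
      if ca = cb ∧ cb = cc ∧ state = 3 then true else false
  | ch :: rest, state, ca, cb, cc =>
      if state = 0 then
        if ch = 'a' then turingLoopA rest 1 (ca + 1) cb cc else false
      else if state = 1 then
        if ch = 'a' then turingLoopA rest 1 (ca + 1) cb cc
        else if ch = 'b' then turingLoopA rest 2 ca (cb + 1) cc
        else false
      else if state = 2 then
        if ch = 'b' then turingLoopA rest 2 ca (cb + 1) cc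
        else if ch = 'c' then turingLoopA rest 3 ca cb (cc + 1)
        else false
      else if state = 3 then
        if ch = 'c' then turingLoopA rest 3 ca cb (cc + 1)
        else false
      else false

def turing_string (s : String) : Bool := turingLoopA s.toList 0 0 0 0

-- ===== PORT B =====
-- Source B: n = len(s) // 3; return n >= 1 and s == 'a'*n + 'b'*n + 'c'*n
-- ('a'*n is List.replicate n 'a'; string comparison done on the character lists).
def turing_string_alt (s : String) : Bool :=
  let n := s.toList.length / 3
  decide (1 ≤ n) &&
    decide (s.toList = List.replicate n 'a' ++ List.replicate n 'b' ++ List.replicate n 'c')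

-- ===== PRECONDITION & SPEC =====
def Spec_turing_string (s : String) (out : Bool) : Prop := out = turing_string_alt s
instance (s : String) (out : Bool) : Decidable (Spec_turing_string s out) := by unfold Spec_turing_string; infer_instance

-- ===== CLAIM (what is proved, stated in full; the proofs are below) =====
def Claim_equal_turing_string : Prop := ∀ (s : String), Dom_turing_string s → Spec_turing_string s (turing_string s)

-- ===== LEMMAS AND PROOFS =====

-- proof helper: the maximal leading run of `c` and the remainder (used only to characterise A's FSM)
def runCount (c : Char) : List Char → Nat × List Char
  | [] => (0, [])
  | x :: xs => if x = c then let p := runCount c xs; (p.1 + 1, p.2) else (0, x :: xs)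

theorem loopA_state3 (l : List Char) (ca cb cc : Nat) :
    turingLoopA l 3 ca cb cc =
      (decide (ca = cb) && decide (cb = cc + (runCount 'c' l).1) && (runCount 'c' l).2.isEmpty) := by
  induction l generalizing cc with
  | nil => simp [turingLoopA, runCount]
  | cons x xs ih =>
      by_cases hx : x = 'c'
      · have e : cc + 1 + (runCount 'c' xs).1 = cc + ((runCount 'c' xs).1 + 1) := by omega
        simp [turingLoopA, runCount, hx, ih (cc + 1), e]
      · simp [turingLoopA, runCount, hx]

theorem loopA_state2 (l : List Char) (ca cb cc : Nat) :
    turingLoopA l 2 ca cb cc =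
      (decide (ca = cb + (runCount 'b' l).1) &&
       decide (cb + (runCount 'b' l).1 = cc + (runCount 'c' (runCount 'b' l).2).1) &&
       (runCount 'c' (runCount 'b' l).2).2.isEmpty &&
       decide (1 ≤ (runCount 'c' (runCount 'b' l).2).1)) := by
  induction l generalizing cb with
  | nil => simp [turingLoopA, runCount]
  | cons x xs ih =>
      by_cases hb : x = 'b'
      · have e : cb + 1 + (runCount 'b' xs).1 = cb + ((runCount 'b' xs).1 + 1) := by omega
        simp [turingLoopA, runCount, hb, ih (cb + 1), e]
      · by_cases hc : x = 'c'
        · have e : cc + 1 + (runCount 'c' xs).1 = cc + ((runCount 'c' xs).1 + 1) := by omega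
          have h3 : 1 ≤ (runCount 'c' xs).1 + 1 := by omega
          simp [turingLoopA, runCount, hc, loopA_state3, e, h3]
        · simp [turingLoopA, runCount, hb, hc]

theorem loopA_state1 (l : List Char) (ca cb cc : Nat) :
    turingLoopA l 1 ca cb cc =
      (decide (ca + (runCount 'a' l).1 = cb + (runCount 'b' (runCount 'a' l).2).1) &&
       decide (cb + (runCount 'b' (runCount 'a' l).2).1
                 = cc + (runCount 'c' (runCount 'b' (runCount 'a' l).2).2).1) &&
       (runCount 'c' (runCount 'b' (runCount 'a' l).2).2).2.isEmpty &&
       decide (1 ≤ (runCount 'b' (runCount 'a' l).2).1) &&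
       decide (1 ≤ (runCount 'c' (runCount 'b' (runCount 'a' l).2).2).1)) := by
  induction l generalizing ca with
  | nil => simp [turingLoopA, runCount]
  | cons x xs ih =>
      by_cases ha : x = 'a'
      · have e : ca + 1 + (runCount 'a' xs).1 = ca + ((runCount 'a' xs).1 + 1) := by omega
        simp [turingLoopA, runCount, ha, ih (ca + 1), e]
      · by_cases hb : x = 'b'
        · have e : cb + 1 + (runCount 'b' xs).1 = cb + ((runCount 'b' xs).1 + 1) := by omega
          have h3 : 1 ≤ (runCount 'b' xs).1 + 1 := by omega
          simp [turingLoopA, runCount, hb, loopA_state2, e, h3]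
        · simp [turingLoopA, runCount, ha, hb]

theorem final_bool (na nb nc : Nat) (b : Bool) :
    (decide (0 + 1 + na = 0 + nb) && decide (0 + nb = 0 + nc) && b &&
      decide (1 ≤ nb) && decide (1 ≤ nc)) =
    (b && (decide (na + 1 = nb) && decide (nb = nc)) && decide (1 ≤ na + 1)) := by
  rw [Bool.eq_iff_iff]
  simp only [Bool.and_eq_true, decide_eq_true_eq]
  constructor
  · rintro ⟨⟨⟨⟨h1, h2⟩, h3⟩, h4⟩, h5⟩
    exact ⟨⟨h3, by omega, by omega⟩, by omega⟩
  · rintro ⟨⟨h3, h1, h2⟩, h4⟩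
    exact ⟨⟨⟨⟨by omega, by omega⟩, h3⟩, by omega⟩, by omega⟩

-- A equals the run-segmentation condition: three equal positive maximal runs consuming the string
theorem turing_runs (s : String) :
    turing_string s =
      (let p1 := runCount 'a' s.toList
       let p2 := runCount 'b' p1.2
       let p3 := runCount 'c' p2.2
       p3.2.isEmpty && (decide (p1.1 = p2.1) && decide (p2.1 = p3.1)) && decide (1 ≤ p1.1)) := by
  unfold turing_string
  cases s.toList with
  | nil => simp [turingLoopA, runCount]
  | cons x xs =>
      by_cases ha : x = 'a'
      · show turingLoopA (x :: xs) 0 0 0 0 = _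
        rw [show turingLoopA (x :: xs) 0 0 0 0 = turingLoopA xs 1 (0 + 1) 0 0 from by
              simp [turingLoopA, ha],
            loopA_state1,
            show runCount 'a' (x :: xs) = ((runCount 'a' xs).1 + 1, (runCount 'a' xs).2) from by
              simp [runCount, ha]]
        exact final_bool _ _ _ _
      · simp [turingLoopA, runCount, ha]

theorem runCount_decomp (c : Char) (l : List Char) :
    List.replicate (runCount c l).1 c ++ (runCount c l).2 = l := by
  induction l with
  | nil => simp [runCount]
  | cons x xs ih =>
      by_cases hx : x = c
      · simp [runCount, hx, List.replicate_succ] at *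
        exact ih
      · simp [runCount, hx]

theorem runCount_rep_cons (c x : Char) (xs : List Char) (n : Nat) (h : x ≠ c) :
    runCount c (List.replicate n c ++ x :: xs) = (n, x :: xs) := by
  induction n with
  | zero => simp [runCount, h]
  | succ m ih => simp [List.replicate_succ, runCount, ih]

theorem runCount_rep (c : Char) (n : Nat) :
    runCount c (List.replicate n c) = (n, []) := by
  induction n with
  | zero => simp [runCount]
  | succ m ih => simp [List.replicate_succ, runCount, ih]

theorem turing_eq (s : String) : turing_string s = turing_string_alt s := by
  rw [turing_runs]
  unfold turing_string_alt
  rw [Bool.eq_iff_iff]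
  simp only [Bool.and_eq_true, decide_eq_true_eq, List.isEmpty_iff]
  constructor
  · rintro ⟨⟨hemp, h12, h23⟩, h1⟩
    have d1 := runCount_decomp 'a' s.toList
    have d2 := runCount_decomp 'b' (runCount 'a' s.toList).2
    have d3 := runCount_decomp 'c' (runCount 'b' (runCount 'a' s.toList).2).2
    rw [hemp, List.append_nil] at d3
    rw [← d2, ← d3, ← h23, ← h12] at d1
    have hlen := congrArg List.length d1
    simp only [List.length_append, List.length_replicate] at hlen
    have hdiv : s.toList.length / 3 = (runCount 'a' s.toList).1 := by omega
    rw [hdiv, List.append_assoc]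
    exact ⟨h1, d1.symm⟩
  · rintro ⟨h1, hrep⟩
    obtain ⟨m, hm⟩ : ∃ m, s.toList.length / 3 = m + 1 :=
      ⟨s.toList.length / 3 - 1, by omega⟩
    rw [hm] at hrep
    have r1 : runCount 'a' s.toList =
        (m + 1, List.replicate (m + 1) 'b' ++ List.replicate (m + 1) 'c') := by
      rw [hrep, List.append_assoc, show List.replicate (m + 1) 'b' = 'b' :: List.replicate m 'b'
            from List.replicate_succ ..]
      exact runCount_rep_cons _ _ _ _ (by decide)
    have r2 : runCount 'b' (List.replicate (m + 1) 'b' ++ List.replicate (m + 1) 'c') =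
        (m + 1, List.replicate (m + 1) 'c') := by
      rw [show List.replicate (m + 1) 'c' = 'c' :: List.replicate m 'c' from List.replicate_succ ..]
      exact runCount_rep_cons _ _ _ _ (by decide)
    have r3 : runCount 'c' (List.replicate (m + 1) 'c') = (m + 1, []) := runCount_rep _ _
    refine ⟨⟨?_, ?_, ?_⟩, ?_⟩ <;> simp [r1, r2, r3]

-- ===== VERDICT (by name: the statement is the Claim_ definition above) =====
theorem turing_string_spec : Claim_equal_turing_string := by
  intro s _
  unfold Spec_turing_string
  exact turing_eq s
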